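-- pv_equiv track=rewrite | github.com/nvamsi2015/elementary-DS | stacksAndQuestions.py | countMinFlips
-- ===== SOURCE A (Python) =====
-- from collections import deque
-- from collections import deque
-- from collections import deque
-- from collections import deque
-- from collections import deque
-- from collections import deque
-- from collections import deque
-- from collections import deque
-- from collections import deque
-- from collections import deque
-- from collections import deque
-- from collections import deque
-- from collections import deque
-- from collections import deque
-- from collections import deque
-- from collections import deque
--
-- def countMinFlips(expression):
--     length = len(expression)
--     if length % 2:
--         return -1
--
--     stack = deque()
--     for char in expression:
--         if char == '}' and stack:
--             if stack[-1] == '{':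
--                 stack.pop()
--             else:
--                 stack.append(char)
--         else:
--             stack.append(char)
--
--     lonely_braces = len(stack)
--     n = 0
--     while stack and stack[-1] == '{':
--         stack.pop()
--         n+=1
--     return lonely_braces//2 + n % 2
-- ===== SOURCE B (Python) =====
-- def countMinFlips(expression):
--     if len(expression) % 2:
--         return -1
--     # reduce to the unique normal form of the rewriting  u + '{}' + v -> u + v
--     r = expression
--     while '{}' in r:
--         r = r.replace('{}', '')
--     run = len(r) - len(r.rstrip('{'))   # trailing run of '{' in the residue
--     return len(r) // 2 + run % 2
-- ===== Notes on version B (the rewrite author's own statement) =====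
-- stated objective: alternative
-- what changed: Replaces the single-pass deque stack simulation plus second popping while-loop by staged fixpoint rewriting: repeatedly delete all '{}' substrings with str.replace until none remain (the unique normal form of this confluent rewriting, which equals A's reduced stack), then read the answer off the residue's length and trailing '{' run.
import Mathlib
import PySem

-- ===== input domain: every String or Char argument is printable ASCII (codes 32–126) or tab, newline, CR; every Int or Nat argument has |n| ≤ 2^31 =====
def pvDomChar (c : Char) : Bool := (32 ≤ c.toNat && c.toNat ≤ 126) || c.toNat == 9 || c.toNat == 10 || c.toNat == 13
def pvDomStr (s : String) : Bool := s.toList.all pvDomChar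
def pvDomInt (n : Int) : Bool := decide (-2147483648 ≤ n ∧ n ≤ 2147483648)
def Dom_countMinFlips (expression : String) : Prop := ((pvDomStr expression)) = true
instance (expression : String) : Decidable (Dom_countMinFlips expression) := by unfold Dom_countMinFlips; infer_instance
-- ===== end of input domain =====

-- B replaces A's stack simulation (deque + second popping while-loop) by staged fixpoint
-- rewriting: repeatedly delete "{}" substrings with str.replace until none remain, then read
-- the answer off the residue (objective: alternative decomposition, not faster).

-- ===== PORT A =====
-- stack modelled head-as-top (deque append/pop at the right ↔ cons/uncons on the left)
def aStep (st : List Char) (c : Char) : List Char :=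
  match st with
  | [] => c :: []                         -- 'stack' falsy: append
  | t :: rest =>
    if c = '}' then
      if t = '{' then rest                -- stack[-1]=='{': pop
      else c :: t :: rest                 -- append
    else c :: t :: rest                   -- append

-- second while-loop of A: count popped trailing '{'
def popBraces : List Char → Nat
  | [] => 0
  | c :: rest => if c = '{' then popBraces rest + 1 else 0

def countMinFlips (expression : String) : Int :=
  let length := PySem.Str.len expression
  if length % 2 ≠ 0 then -1
  else
    let stack := expression.toList.foldl aStep []
    let lonely : Nat := stack.length
    let n : Nat := popBraces stack
    (↑(lonely / 2) : Int) + ↑(n % 2)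

-- ===== PORT B =====
-- equation lemmas for PySem.Chars.replace.go (cited below and by the termination proof)
theorem goZero (old new l acc : List Char) :
    PySem.Chars.replace.go old new 0 l acc = acc.reverse ++ l := by
  rw [PySem.Chars.replace.go]

theorem goSuccNil (old new : List Char) (fuel : Nat) (acc : List Char) :
    PySem.Chars.replace.go old new (fuel + 1) [] acc = acc.reverse := by
  rw [PySem.Chars.replace.go]; simp

theorem goSuccCons (fuel : Nat) (c : Char) (t acc : List Char) :
    PySem.Chars.replace.go ['{', '}'] [] (fuel + 1) (c :: t) acc =
      (if List.isPrefixOf ['{', '}'] (c :: t) then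
        PySem.Chars.replace.go ['{', '}'] [] fuel (t.drop 1) acc
       else PySem.Chars.replace.go ['{', '}'] [] fuel t (c :: acc)) := by
  rw [PySem.Chars.replace.go]
  by_cases h : List.isPrefixOf ['{', '}'] (c :: t) <;> simp [h]

-- termination facts for B's while-loop (cited by name in `decreasing_by`)
theorem goLenLe (fuel : Nat) (l acc : List Char) :
    (PySem.Chars.replace.go ['{', '}'] [] fuel l acc).length ≤ acc.length + l.length := by
  induction fuel generalizing l acc with
  | zero => rw [goZero]; simp [Nat.add_comm]
  | succ fuel ih =>
    cases l with
    | nil => rw [goSuccNil]; simp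
    | cons c t =>
      rw [goSuccCons]
      by_cases h : List.isPrefixOf ['{', '}'] (c :: t)
      · rw [if_pos h]
        have := ih (t.drop 1) acc
        have hl : (t.drop 1).length ≤ t.length := by simp
        simp only [List.length_cons]
        omega
      · rw [if_neg h]
        have := ih t (c :: acc)
        simp only [List.length_cons] at *
        omega

theorem goLenLt (fuel : Nat) (l acc : List Char)
    (hf : l.length ≤ fuel) (hin : ['{', '}'] <:+: l) :
    (PySem.Chars.replace.go ['{', '}'] [] fuel l acc).length < acc.length + l.length := by
  induction fuel generalizing l acc with
  | zero =>
    exfalso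
    have : l = [] := List.length_eq_zero_iff.mp (Nat.le_zero.mp hf)
    subst this
    simpa using hin.length_le
  | succ fuel ih =>
    cases l with
    | nil => exfalso; simpa using hin.length_le
    | cons c t =>
      rw [goSuccCons]
      by_cases h : List.isPrefixOf ['{', '}'] (c :: t)
      · rw [if_pos h]
        have hp : ['{', '}'] <+: (c :: t) := List.isPrefixOf_iff_prefix.mp h
        have h2 : 2 ≤ (c :: t).length := by simpa using hp.length_le
        have := goLenLe fuel (t.drop 1) acc
        have hl : (t.drop 1).length = t.length - 1 := by simp
        simp only [List.length_cons] at *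
        omega
      · rw [if_neg h]
        have hint : ['{', '}'] <:+: t := by
          rcases List.infix_cons_iff.mp hin with hp | hi
          · exact absurd (List.isPrefixOf_iff_prefix.mpr hp) h
          · exact hi
        have := ih t (c :: acc) (by simp at hf ⊢; omega) hint
        simp only [List.length_cons] at *
        omega

theorem bReplaceLenLt (r : List Char) (h : PySem.Chars.isIn ['{', '}'] r = true) :
    (PySem.Chars.replace r ['{', '}'] []).length < r.length := by
  have hin : ['{', '}'] <:+: r := (PySem.Chars.isIn_iff_infix _ _).mp h
  unfold PySem.Chars.replace
  simp only [List.isEmpty_cons, Bool.false_eq_true, if_false]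
  have := goLenLt r.length r [] (le_refl _) hin
  simpa using this

-- the `while "{}" in r: r = r.replace("{}", "")` loop (on code points)
def bLoop (r : List Char) : List Char :=
  if h : PySem.Chars.isIn ['{', '}'] r = true then
    bLoop (PySem.Chars.replace r ['{', '}'] [])
  else r
  termination_by r.length
  decreasing_by exact bReplaceLenLt r h

def countMinFlips_alt (expression : String) : Int :=
  if PySem.Str.len expression % 2 ≠ 0 then -1
  else
    let r := bLoop expression.toList
    -- run = len(r) - len(r.rstrip("{")) : r.rstrip("{") ported by hand (exact)
    let run : Nat := r.length - ((r.reverse.dropWhile (fun c => c == '{')).reverse).length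
    (↑(r.length / 2) : Int) + ↑(run % 2)

-- ===== PRECONDITION & SPEC =====
def Spec_countMinFlips (expression : String) (out : Int) : Prop := out = countMinFlips_alt expression
instance (expression : String) (out : Int) : Decidable (Spec_countMinFlips expression out) := by unfold Spec_countMinFlips; infer_instance

-- ===== CLAIM =====
def Claim_equal_countMinFlips : Prop := ∀ (expression : String), Dom_countMinFlips expression → Spec_countMinFlips expression (countMinFlips expression)

-- ===== LEMMAS AND PROOFS =====

theorem aStep_open (st : List Char) : aStep st '{' = '{' :: st := by
  cases st <;> simp [aStep]

theorem aStep_close (st : List Char) : aStep ('{' :: st) '}' = st := by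
  simp [aStep]

-- one full `replace` pass preserves the stack reduction
theorem redGo (fuel : Nat) (l acc : List Char) :
    List.foldl aStep [] (PySem.Chars.replace.go ['{', '}'] [] fuel l acc)
      = List.foldl aStep [] (acc.reverse ++ l) := by
  induction fuel generalizing l acc with
  | zero => rw [goZero]
  | succ fuel ih =>
    cases l with
    | nil => rw [goSuccNil]; simp
    | cons c t =>
      rw [goSuccCons]
      by_cases h : List.isPrefixOf ['{', '}'] (c :: t)
      · rw [if_pos h]
        have hp : ['{', '}'] <+: (c :: t) := List.isPrefixOf_iff_prefix.mp h
        obtain ⟨t2, ht⟩ := hp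
        have hc : c = '{' ∧ t = '}' :: t2 := by simpa using ht.symm
        obtain ⟨rfl, rfl⟩ := hc
        rw [ih]
        simp [List.foldl_append, aStep_open, aStep_close]
      · rw [if_neg h]
        rw [ih]
        simp

theorem redReplace (l : List Char) :
    List.foldl aStep [] (PySem.Chars.replace l ['{', '}'] []) = List.foldl aStep [] l := by
  unfold PySem.Chars.replace
  simp only [List.isEmpty_cons, Bool.false_eq_true, if_false]
  simpa using redGo l.length l []

theorem redBLoop (l : List Char) :
    List.foldl aStep [] (bLoop l) = List.foldl aStep [] l := by
  fun_induction bLoop l with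
  | case1 r h ih => rw [ih, redReplace]
  | case2 r h => rfl

theorem bLoop_noIn (l : List Char) :
    PySem.Chars.isIn ['{', '}'] (bLoop l) = false := by
  fun_induction bLoop l with
  | case1 r h ih => exact ih
  | case2 r h => simpa using h

-- with no "{}" left, the stack simulation just reverses the string
theorem nf (r : List Char) : ∀ (st : List Char),
    PySem.Chars.isIn ['{', '}'] (st.reverse ++ r) = false →
    List.foldl aStep st r = r.reverse ++ st := by
  induction r with
  | nil => intro st _; simp
  | cons c t ih =>
    intro st hno
    by_cases hpop : (∃ rest, st = '{' :: rest) ∧ c = '}'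
    · exfalso
      obtain ⟨⟨rest, rfl⟩, rfl⟩ := hpop
      have hinf : ['{', '}'] <:+: (('{' :: rest).reverse ++ '}' :: t) :=
        ⟨rest.reverse, t, by simp⟩
      rw [PySem.Chars.isIn_eq_false_iff] at hno
      exact hno hinf
    · have hstep : aStep st c = c :: st := by
        cases st with
        | nil => rfl
        | cons t0 rest =>
          by_cases hc : c = '}'
          · have ht0 : t0 ≠ '{' := by
              intro h0
              exact hpop ⟨⟨rest, by rw [h0]⟩, hc⟩
            simp [aStep, hc, ht0]
          · simp [aStep, hc]
      rw [List.foldl_cons, hstep, ih (c :: st) (by simpa using hno)]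
      simp

theorem popBraces_takeWhile (l : List Char) :
    popBraces l = (l.takeWhile (fun c => c == '{')).length := by
  induction l with
  | nil => rfl
  | cons c t ih =>
    by_cases h : c = '{'
    · subst h; simp [popBraces, ih]
    · simp [popBraces, h]

-- A's two post-loop quantities read off B's residue
theorem runEq (R : List Char) :
    popBraces R.reverse = R.length - ((R.reverse.dropWhile (fun c => c == '{')).reverse).length := by
  rw [popBraces_takeWhile]
  have hsplit : (R.reverse.takeWhile (fun c => c == '{')).length
        + (R.reverse.dropWhile (fun c => c == '{')).length = R.length := by
    rw [← List.length_append, List.takeWhile_append_dropWhile, List.length_reverse]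
  simp only [List.length_reverse]
  omega

-- ===== VERDICT =====
theorem countMinFlips_spec : Claim_equal_countMinFlips := by
  intro expression _
  show countMinFlips expression = countMinFlips_alt expression
  simp only [countMinFlips, countMinFlips_alt]
  split_ifs with h
  · rfl
  · have hstack : expression.toList.foldl aStep [] = (bLoop expression.toList).reverse := by
      rw [← redBLoop]
      have := nf (bLoop expression.toList) []
      simpa using this (by simpa using bLoop_noIn expression.toList)
    rw [hstack, runEq]
    simp
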